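-- pv_equiv track=rewrite | github.com/nango94213/Leetcode-solution | 2507-smallest-value-after-replacing-with-sum-of-prime-factors/2507-smallest-value-after-replacing-with-sum-of-prime-factors.py | smallestValue
-- ===== SOURCE A (Python) =====
-- def smallestValue(n: int) -> int:
--     def check(num):
--         total = 0
--         for i in range(2, num+1):
--             while num % i == 0:
--                 total += i
--                 num //= i
--         return total
--
--     start = check(n)
--     while n != start:
--         n = start
--         start = check(n)
--     return n
-- ===== SOURCE B (Python) =====
-- def smallestValue(n: int) -> int:
--     def check(num):
--         total = 0
--         i = 2
--         while i * i <= num: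
--             while num % i == 0:
--                 total += i
--                 num //= i
--             i += 1
--         if num > 1:
--             total += num
--         return total
--
--     start = check(n)
--     while n != start:
--         n = start
--         start = check(n)
--     return n
-- ===== Notes on version B (the rewrite author's own statement) =====
-- stated objective: faster
-- what changed: check() factors by trial division only up to sqrt(num) and adds the single remaining prime cofactor, instead of A's scan of every candidate divisor up to num itself.
import Mathlib
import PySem

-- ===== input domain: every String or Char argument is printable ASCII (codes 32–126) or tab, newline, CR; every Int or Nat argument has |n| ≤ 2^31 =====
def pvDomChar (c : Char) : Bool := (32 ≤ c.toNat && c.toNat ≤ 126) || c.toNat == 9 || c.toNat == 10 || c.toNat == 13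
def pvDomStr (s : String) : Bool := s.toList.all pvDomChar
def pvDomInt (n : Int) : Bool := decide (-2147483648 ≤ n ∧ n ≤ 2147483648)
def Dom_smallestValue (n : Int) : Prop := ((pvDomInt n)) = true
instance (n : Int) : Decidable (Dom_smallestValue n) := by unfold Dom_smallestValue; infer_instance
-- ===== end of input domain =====

-- B replaces A's O(n) trial division (i = 2 .. num) inside check() by trial division up to
-- sqrt(num) plus the remaining prime cofactor; the fixed-point iteration is unchanged.

-- ===== PORT A =====
-- inner `while num % i == 0: total += i; num //= i` of A's check; the Nat fuel only makes the
-- recursion total (it is never exhausted on reachable states, where 1 <= num).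
def pvInnerA : Nat → Int → Int → Int → Int × Int
  | 0, t, m, _ => (t, m)
  | f+1, t, m, i =>
    if PySem.Int.mod m i = 0 then pvInnerA f (t + i) (PySem.Int.floordiv m i) i
    else (t, m)

-- A's check: for i in range(2, num+1): while num % i == 0: total += i; num //= i
def pvCheckA (num : Int) : Int :=
  ((PySem.List.pyRange 2 (num+1) 1).foldl
    (fun s i => pvInnerA (s.2.natAbs + 1) s.1 s.2 i) ((0 : Int), num)).1

-- outer `while n != start: n = start; start = check(n)`; fuel only for totality
def pvLoopA : Nat → Int → Int → Int
  | 0, n, _ => n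
  | f+1, n, start => if n = start then n else pvLoopA f start (pvCheckA start)

def smallestValue (n : Int) : Int := pvLoopA (n.natAbs + 2) n (pvCheckA n)

-- ===== PORT B =====
-- inner `while num % i == 0` of B's check (same inner while as the Python source); fueled for totality
def pvInnerB : Nat → Int → Int → Int → Int × Int
  | 0, t, m, _ => (t, m)
  | f+1, t, m, i =>
    if PySem.Int.mod m i = 0 then pvInnerB f (t + i) (PySem.Int.floordiv m i) i
    else (t, m)

-- B's `while i * i <= num:` loop; fuel only for totality
def pvLoopB : Nat → Int → Int → Int → Int × Int
  | 0, t, m, _ => (t, m)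
  | f+1, t, m, i =>
    if i * i ≤ m then
      let s := pvInnerB (m.natAbs + 1) t m i
      pvLoopB f s.1 s.2 (i + 1)
    else (t, m)

-- B's check: trial division up to sqrt, then `if num > 1: total += num`
def pvCheckB (num : Int) : Int :=
  let s := pvLoopB (num.natAbs + 2) 0 num 2
  if 1 < s.2 then s.1 + s.2 else s.1

-- B's outer `while n != start:` loop; fuel only for totality
def pvLoopFixB : Nat → Int → Int → Int
  | 0, n, _ => n
  | f+1, n, start => if n = start then n else pvLoopFixB f start (pvCheckB start)

def smallestValue_alt (n : Int) : Int := pvLoopFixB (n.natAbs + 2) n (pvCheckB n)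

-- ===== PRECONDITION & SPEC =====
def Spec_smallestValue (n : Int) (out : Int) : Prop := out = smallestValue_alt n
instance (n : Int) (out : Int) : Decidable (Spec_smallestValue n out) := by unfold Spec_smallestValue; infer_instance

-- ===== CLAIM (what is proved, stated in full; the proofs are below) =====
def Claim_equal_smallestValue : Prop := ∀ (n : Int), Dom_smallestValue n → Spec_smallestValue n (smallestValue n)

-- ===== LEMMAS AND PROOFS =====

-- Reference function: pvS m i = sum of the prime factors ≥ i of m found by trial division from i up.
def pvS (m i : Int) : Int :=
  if h : m ≤ 1 ∨ i ≤ 1 ∨ m < i then 0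
  else if hd : i ∣ m then i + pvS (m / i) i
  else pvS m (i + 1)
termination_by (m.toNat, (m - i).toNat)
decreasing_by
  · left
    have h2 : 2 ≤ i := by omega
    have hm2 : 2 ≤ m := by omega
    obtain ⟨c, hc⟩ := hd
    have hc1 : 1 ≤ c := by nlinarith
    have hdiv : m / i = c := by rw [hc, Int.mul_ediv_cancel_left _ (by omega)]
    have : c < m := by nlinarith
    omega
  · have him : i < m := by
      rcases lt_or_eq_of_le (show i ≤ m by omega) with h' | h'
      · exact h'
      · exact absurd (h' ▸ dvd_refl m) hd
    right
    omega

lemma pvS_zero (m i : Int) (h : m ≤ 1 ∨ i ≤ 1 ∨ m < i) : pvS m i = 0 := by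
  rw [pvS]; simp [h]

lemma pvS_dvd (m i : Int) (hm : 1 ≤ m) (hi : 2 ≤ i) (hd : i ∣ m) :
    pvS m i = i + pvS (m / i) i := by
  have hle : i ≤ m := Int.le_of_dvd (by omega) hd
  rw [pvS]
  simp only [hd]
  rw [dif_neg (by omega)]
  simp

lemma pvS_not_dvd (m i : Int) (hi : 2 ≤ i) (hd : ¬ i ∣ m) :
    pvS m i = pvS m (i + 1) := by
  by_cases hm : m ≤ 1
  · rw [pvS_zero _ _ (Or.inl hm), pvS_zero _ _ (Or.inl hm)]
  · by_cases hlt : m < i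
    · rw [pvS_zero _ _ (Or.inr (Or.inr hlt)), pvS_zero _ _ (Or.inr (Or.inr (by omega)))]
    · rw [pvS]
      rw [dif_neg (by omega)]
      simp [hd]

-- pvS m i = m when m ≥ 2 has no proper divisor in [i, m)
lemma pvS_self : ∀ (k : Nat) (m i : Int), 2 ≤ i → i ≤ m → m - i ≤ (k : Int) →
    (∀ d, i ≤ d → d < m → ¬ d ∣ m) → pvS m i = m := by
  intro k
  induction k with
  | zero =>
    intro m i hi him hk _
    have : i = m := by omega
    subst this
    rw [pvS_dvd _ _ (by omega) hi (dvd_refl _), Int.ediv_self (by omega),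
      pvS_zero _ _ (Or.inl (by omega))]
    omega
  | succ k ih =>
    intro m i hi him hk hnd
    by_cases hd : i ∣ m
    · have : i = m := by
        rcases lt_or_eq_of_le him with h' | h'
        · exact absurd hd (hnd i le_rfl h')
        · exact h'
      subst this
      rw [pvS_dvd _ _ (by omega) hi (dvd_refl _), Int.ediv_self (by omega),
        pvS_zero _ _ (Or.inl (by omega))]
      omega
    · have him' : i < m := by
        rcases lt_or_eq_of_le him with h' | h'
        · exact h'
        · exact absurd (h' ▸ dvd_refl m) hd
      rw [pvS_not_dvd _ _ hi hd]
      exact ih m (i + 1) (by omega) (by omega) (by omega)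
        (fun d hd1 hd2 => hnd d (by omega) hd2)

-- full characterisation of the shared inner while-loop
lemma pvInnerA_spec : ∀ (f : Nat) (t m i : Int), 2 ≤ i → 1 ≤ m → m ≤ (f : Int) →
    1 ≤ (pvInnerA f t m i).2 ∧ (pvInnerA f t m i).2 ≤ m ∧ ¬ i ∣ (pvInnerA f t m i).2 ∧
    (∀ d : Int, d ∣ (pvInnerA f t m i).2 → d ∣ m) ∧
    (pvInnerA f t m i).1 + pvS (pvInnerA f t m i).2 i = t + pvS m i := by
  intro f
  induction f with
  | zero => intro t m i hi hm hf; simp at hf; omega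
  | succ f ih =>
    intro t m i hi hm hf
    by_cases hd : i ∣ m
    · have hmod : PySem.Int.mod m i = 0 := (PySem.Int.mod_eq_zero_iff_dvd m i).mpr hd
      have hfd : PySem.Int.floordiv m i = m / i :=
        PySem.Int.floordiv_eq_ediv_of_pos (by omega)
      have hle : i ≤ m := Int.le_of_dvd (by omega) hd
      obtain ⟨c, hc⟩ := hd
      have hc1 : 1 ≤ c := by nlinarith
      have hdivc : m / i = c := by rw [hc, Int.mul_ediv_cancel_left _ (by omega)]
      have hd : i ∣ m := ⟨c, hc⟩
      have h1 : 1 ≤ m / i := by omega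
      have hlt : m / i < m := by nlinarith
      have step : pvInnerA (f+1) t m i = pvInnerA f (t + i) (m / i) i := by
        simp [pvInnerA, hmod, hfd]
      rw [step]
      obtain ⟨p1, p2, p3, p4, p5⟩ := ih (t + i) (m / i) i hi h1 (by omega)
      refine ⟨p1, by omega, p3, ?_, ?_⟩
      · intro d hdvd
        have hdm : m / i ∣ m := ⟨i, (Int.ediv_mul_cancel hd).symm⟩
        exact dvd_trans (p4 d hdvd) hdm
      · rw [p5, pvS_dvd m i hm hi hd]; ring
    · have hmod : ¬ PySem.Int.mod m i = 0 := fun h =>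
        hd ((PySem.Int.mod_eq_zero_iff_dvd m i).mp h)
      have step : pvInnerA (f+1) t m i = (t, m) := by
        simp [pvInnerA, hmod]
      rw [step]
      exact ⟨hm, le_rfl, hd, fun d h => h, rfl⟩

lemma pvInnerB_eq (f : Nat) : ∀ (t m i : Int), pvInnerB f t m i = pvInnerA f t m i := by
  induction f with
  | zero => intro t m i; rfl
  | succ f ih =>
    intro t m i
    simp only [pvInnerB, pvInnerA]
    split
    · exact ih _ _ _
    · rfl

-- A's for-loop over range(2, num+1)
lemma pvFoldA_spec : ∀ (k : Nat) (a b t m : Int), b - a ≤ (k : Int) → 2 ≤ a → 1 ≤ m → m < b →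
    ((PySem.List.pyRange a b 1).foldl
      (fun s i => pvInnerA (s.2.natAbs + 1) s.1 s.2 i) (t, m)).1 = t + pvS m a := by
  intro k
  induction k with
  | zero =>
    intro a b t m hk ha hm hmb
    rw [PySem.List.pyRange_one_eq_nil (by omega)]
    rw [pvS_zero _ _ (Or.inr (Or.inr (by omega)))]
    simp
  | succ k ih =>
    intro a b t m hk ha hm hmb
    by_cases hab : b ≤ a
    · rw [PySem.List.pyRange_one_eq_nil hab]
      rw [pvS_zero _ _ (Or.inr (Or.inr (by omega)))]
      simp
    · rw [PySem.List.pyRange_one_cons (by omega)]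
      rw [List.foldl_cons]
      obtain ⟨p1, p2, p3, p4, p5⟩ :=
        pvInnerA_spec (m.natAbs + 1) t m a ha hm (by omega)
      set s := pvInnerA (m.natAbs + 1) t m a with hs
      have hpair : s = (s.1, s.2) := rfl
      rw [hpair]
      rw [ih (a + 1) b s.1 s.2 (by omega) (by omega) p1 (by omega)]
      rw [← pvS_not_dvd s.2 a ha p3, p5]

lemma pvCheckA_eq (num : Int) : pvCheckA num = pvS num 2 := by
  by_cases h : num ≤ 1
  · unfold pvCheckA
    rw [PySem.List.pyRange_one_eq_nil (by omega)]
    rw [pvS_zero _ _ (by omega)]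
    simp
  · unfold pvCheckA
    simpa using pvFoldA_spec (num - 1).toNat 2 (num + 1) 0 num (by omega) (by omega)
      (by omega) (by omega)

-- B's sqrt loop
lemma pvLoopB_spec : ∀ (f : Nat) (t m i : Int), 2 ≤ i → 1 ≤ m → m < i + (f : Int) →
    (∀ d : Int, 2 ≤ d → d < i → ¬ d ∣ m) →
    (if 1 < (pvLoopB f t m i).2 then (pvLoopB f t m i).1 + (pvLoopB f t m i).2
      else (pvLoopB f t m i).1) = t + pvS m i := by
  intro f
  induction f with
  | zero =>
    intro t m i hi hm hf hinv
    have hm1 : m ≤ 1 := by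
      by_contra h
      exact hinv m (by omega) (by simp at hf; omega) (dvd_refl m)
    simp only [pvLoopB]
    rw [if_neg (by omega), pvS_zero _ _ (Or.inl hm1)]
    omega
  | succ f ih =>
    intro t m i hi hm hf hinv
    by_cases hc : i * i ≤ m
    · have step : pvLoopB (f+1) t m i =
          pvLoopB f (pvInnerB (m.natAbs + 1) t m i).1 (pvInnerB (m.natAbs + 1) t m i).2 (i + 1) := by
        simp [pvLoopB, hc]
      rw [step, pvInnerB_eq]
      obtain ⟨p1, p2, p3, p4, p5⟩ := pvInnerA_spec (m.natAbs + 1) t m i hi hm (by omega)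
      set s := pvInnerA (m.natAbs + 1) t m i with hs
      have hinv' : ∀ d : Int, 2 ≤ d → d < i + 1 → ¬ d ∣ s.2 := by
        intro d h2 hlt hdvd
        by_cases hdi : d < i
        · exact hinv d h2 hdi (p4 d hdvd)
        · have : d = i := by omega
          exact p3 (this ▸ hdvd)
      rw [ih s.1 s.2 (i + 1) (by omega) p1 (by omega) hinv']
      rw [← pvS_not_dvd s.2 i hi p3, p5]
    · have step : pvLoopB (f+1) t m i = (t, m) := by
        simp [pvLoopB, hc]
      rw [step]
      by_cases hm1 : 1 < m
      · have him : i ≤ m := by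
          by_contra h
          exact hinv m (by omega) (by omega) (dvd_refl m)
        have hnd : ∀ d : Int, i ≤ d → d < m → ¬ d ∣ m := by
          intro d hd1 hd2 hdvd
          rcases hdvd with ⟨c, hc⟩
          have hc1 : 1 ≤ c := by nlinarith
          have hc2 : 2 ≤ c := by
            rcases lt_or_eq_of_le hc1 with h' | h'
            · omega
            · exfalso; rw [← h'] at hc; omega
          have hci : c < i := by nlinarith
          exact hinv c hc2 hci ⟨d, by linarith [hc]⟩
        rw [pvS_self (m - i).toNat m i hi him (by omega) hnd]
        rw [if_pos hm1]
      · simp only [if_neg hm1]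
        rw [pvS_zero _ _ (Or.inl (by omega))]
        omega

lemma pvCheckB_eq (num : Int) : pvCheckB num = pvS num 2 := by
  have hshow : pvCheckB num =
      (if 1 < (pvLoopB (num.natAbs + 2) 0 num 2).2 then
        (pvLoopB (num.natAbs + 2) 0 num 2).1 + (pvLoopB (num.natAbs + 2) 0 num 2).2
      else (pvLoopB (num.natAbs + 2) 0 num 2).1) := rfl
  by_cases h : num ≤ 1
  · have e : pvLoopB (num.natAbs + 1 + 1) 0 num 2 =
        if (2 : Int) * 2 ≤ num then
          pvLoopB (num.natAbs + 1) (pvInnerB (num.natAbs + 1) 0 num 2).1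
            (pvInnerB (num.natAbs + 1) 0 num 2).2 (2 + 1)
        else (0, num) := rfl
    rw [hshow, show num.natAbs + 2 = num.natAbs + 1 + 1 from rfl, e,
      if_neg (show ¬ ((2 : Int) * 2 ≤ num) by omega)]
    rw [if_neg (show ¬ ((1 : Int) < num) by omega), pvS_zero _ _ (Or.inl h)]
  · rw [hshow]
    simpa using pvLoopB_spec (num.natAbs + 2) 0 num 2 (by omega) (by omega) (by omega)
      (fun d h1 h2 => by omega)

lemma pvLoop_eq : ∀ (f : Nat) (n s : Int), pvLoopA f n s = pvLoopFixB f n s := by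
  intro f
  induction f with
  | zero => intro n s; rfl
  | succ f ih =>
    intro n s
    simp only [pvLoopA, pvLoopFixB]
    split
    · rfl
    · rw [ih, pvCheckA_eq, ← pvCheckB_eq]

-- ===== VERDICT (by name: the statement is the Claim_ definition above) =====
theorem smallestValue_spec : Claim_equal_smallestValue := by
  intro n _
  unfold Spec_smallestValue smallestValue smallestValue_alt
  rw [pvLoop_eq, pvCheckA_eq, ← pvCheckB_eq]
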